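-- pv_equiv track=rewrite | github.com/Tudiyoloman/tudor | main.py | single_appearance
-- ===== SOURCE A (Python) =====
-- def single_appearance(text):
--     """
--     Se afiseaza cuvintele care apar o singura data in text
--     :param text: String
--     :return: List of strings
--     complexitate timp O(n) , n este numarul de cuvinte din text
--     complexitate spatiu O(n) , n este numarul de cuvinte din text
--     DPDV al complexitatii nu exista o metoda mai eficienta de a face aceasta problema
--     """
--     map_appearance = {}
--     for string in text.split():
--         if string in map_appearance:
--             map_appearance[string] += 1
--         else:
--             map_appearance[string] = 1
--
--     list_of_single_appearance = []
--     for key in map_appearance: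
--         if map_appearance[key] == 1:
--             list_of_single_appearance.append(key)
--     return list_of_single_appearance
-- ===== SOURCE B (Python) =====
-- def single_appearance(text):
--     """
--     Words that appear exactly once in text, in first-appearance order.
--     One pass: track exactly-once candidates in an order-preserving dict and
--     demote repeated words to a set; no full count map, no second filter pass.
--     """
--     seen_once = {}
--     seen_multiple = set()
--     for word in text.split():
--         if word in seen_multiple:
--             continue
--         if word in seen_once:
--             del seen_once[word]
--             seen_multiple.add(word)
--         else:
--             seen_once[word] = True
--     return list(seen_once)
-- ===== Notes on version B (the rewrite author's own statement) =====
-- stated objective: alternative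
-- what changed: Instead of building a full word->count map and then filtering it in a second pass, B makes a single pass keeping an order-preserving dict of exactly-once candidates and a set of repeated words, deleting a candidate the moment it repeats.
import Mathlib
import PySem

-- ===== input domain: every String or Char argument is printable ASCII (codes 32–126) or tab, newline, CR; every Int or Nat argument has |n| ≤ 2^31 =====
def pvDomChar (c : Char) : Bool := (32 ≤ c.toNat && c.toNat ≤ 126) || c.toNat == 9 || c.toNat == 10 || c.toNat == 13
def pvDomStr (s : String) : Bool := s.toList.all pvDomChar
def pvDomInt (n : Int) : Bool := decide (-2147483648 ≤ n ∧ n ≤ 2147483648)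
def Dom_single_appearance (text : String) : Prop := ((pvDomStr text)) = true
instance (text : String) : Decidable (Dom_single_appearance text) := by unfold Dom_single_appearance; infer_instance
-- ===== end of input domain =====

-- B replaces A's count-map-then-filter (two passes) by one pass that keeps an ordered dict of
-- exactly-once candidates and a set of repeated words (objective: alternative, same O(n) cost).

-- ===== PORT A =====
-- A's first loop: build the word -> count map.
def pvCountMap (ws : List String) : PySem.Dict String Int :=
  ws.foldl
    (fun d w => if (d.get? w).isSome then d.modify w 0 (fun v => v + 1) else d.insert w 1)
    PySem.Dict.empty

-- A's second loop: collect the keys whose count is 1.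
def pvFilterOnce (m : PySem.Dict String Int) : List String :=
  m.keys.foldl (fun acc k => if m.getD k 0 = 1 then acc ++ [k] else acc) []

def single_appearance (text : String) : List String :=
  pvFilterOnce (pvCountMap (PySem.Str.split₀ text))

-- ===== PORT B =====
-- B's loop body: skip words already seen twice; demote a once-seen word to seen_multiple;
-- otherwise record it as a fresh exactly-once candidate.
def pvStepB (st : PySem.Dict String Bool × PySem.Set String) (w : String) :
    PySem.Dict String Bool × PySem.Set String :=
  if st.2.contains w then st
  else if st.1.contains w then (st.1.erase w, st.2.add w)
  else (st.1.insert w true, st.2)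

def single_appearance_alt (text : String) : List String :=
  ((PySem.Str.split₀ text).foldl pvStepB (PySem.Dict.empty, PySem.Set.empty)).1.keys

-- ===== PRECONDITION & SPEC =====
def Spec_single_appearance (text : String) (out : List String) : Prop := out = single_appearance_alt text
instance (text : String) (out : List String) : Decidable (Spec_single_appearance text out) := by unfold Spec_single_appearance; infer_instance

-- ===== CLAIM (what is proved, stated in full; the proofs are below) =====
def Claim_equal_single_appearance : Prop := ∀ (text : String), Dom_single_appearance text → Spec_single_appearance text (single_appearance text)

-- ===== LEMMAS AND PROOFS =====

-- Common characterisation: the words of p (first-appearance order) whose count in p is 1.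
def pvTarget (p : List String) : List String :=
  (PySem.List.dedup p).filter (fun k => decide (p.count k = 1))

theorem pvMem_target (p : List String) (k : String) :
    k ∈ pvTarget p ↔ k ∈ p ∧ p.count k = 1 := by
  simp [pvTarget, PySem.List.dedup, PySem.Set.mem_ofList]

theorem pvCount_concat_self (p : List String) (w : String) :
    (p ++ [w]).count w = p.count w + 1 := by
  rw [List.count_append]; simp

theorem pvCount_concat_ne (p : List String) (w k : String) (hk : k ≠ w) :
    (p ++ [w]).count k = p.count k := by
  rw [List.count_append]
  have h0 : List.count k [w] = 0 := List.count_eq_zero.mpr (by simp [hk])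
  omega

theorem pvDedup_concat (p : List String) (w : String) :
    PySem.List.dedup (p ++ [w]) =
      if w ∈ p then PySem.List.dedup p else PySem.List.dedup p ++ [w] := by
  have h : PySem.List.dedup (p ++ [w]) = PySem.Set.add (PySem.List.dedup p) w := by
    simp [PySem.List.dedup, PySem.Set.ofList, List.foldl_append]
  have hc : PySem.Set.contains (PySem.List.dedup p) w = decide (w ∈ p) := by
    simp [PySem.Set.contains, PySem.List.dedup, PySem.Set.mem_ofList]
  rw [h]
  unfold PySem.Set.add
  rw [hc]
  by_cases hw : w ∈ p <;> simp [hw]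

theorem pvTarget_concat_mem (p : List String) (w : String) (hw : w ∈ p) :
    pvTarget (p ++ [w]) = (pvTarget p).filter (fun k => !(k == w)) := by
  unfold pvTarget
  rw [pvDedup_concat, if_pos hw, List.filter_filter]
  refine List.filter_congr ?_
  intro k _
  by_cases hk : k = w
  · subst hk
    have h1 : 0 < p.count k := List.count_pos_iff.mpr hw
    rw [pvCount_concat_self]
    simp; omega
  · rw [pvCount_concat_ne p w k hk]
    simp [hk]

theorem pvTarget_concat_not_mem (p : List String) (w : String) (hw : w ∉ p) :
    pvTarget (p ++ [w]) = pvTarget p ++ [w] := by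
  unfold pvTarget
  rw [pvDedup_concat, if_neg hw, List.filter_append]
  have hw0 : p.count w = 0 := List.count_eq_zero.mpr hw
  congr 1
  · refine List.filter_congr ?_
    intro k hk
    have hkp : k ∈ p := (PySem.Set.mem_ofList p k).mp hk
    have hkw : k ≠ w := fun h => hw (h ▸ hkp)
    rw [pvCount_concat_ne p w k hkw]
  · simp [hw0]

theorem pvTarget_filter_of_two_le (p : List String) (w : String) (hw : 2 ≤ p.count w) :
    (pvTarget p).filter (fun k => !(k == w)) = pvTarget p := by
  refine List.filter_eq_self.mpr ?_
  intro k hk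
  have hmem := (pvMem_target p k).mp hk
  have hkw : k ≠ w := by
    intro h; subst h; omega
  simp [hkw]

-- Loop invariant for B's single pass over the prefix p of the word list.
def pvInv (p : List String) (st : PySem.Dict String Bool × PySem.Set String) : Prop :=
  st.1.items = (pvTarget p).map (fun k => (k, true)) ∧
  ∀ k, k ∈ st.2 ↔ 2 ≤ p.count k

theorem pvInv_step (p : List String) (w : String)
    (st : PySem.Dict String Bool × PySem.Set String) (h : pvInv p st) :
    pvInv (p ++ [w]) (pvStepB st w) := by
  obtain ⟨once, mult⟩ := st
  obtain ⟨h1, h2⟩ := h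
  simp only at h1 h2
  have hkeys : once.keys = pvTarget p := by
    simp [PySem.Dict.keys, h1, Function.comp_def]
  have hcont : once.contains w = decide (w ∈ pvTarget p) := by
    by_cases hm : w ∈ pvTarget p
    · simp [hm, (PySem.Dict.contains_iff_mem_keys once w).mpr (hkeys ▸ hm)]
    · have hne : ¬ once.contains w = true := fun hc =>
        hm (hkeys ▸ (PySem.Dict.contains_iff_mem_keys once w).mp hc)
      simp [hm, Bool.eq_false_iff.mpr hne]
  have hmc : PySem.Set.contains mult w = decide (2 ≤ p.count w) := by
    simp [PySem.Set.contains, h2 w]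
  unfold pvStepB
  by_cases h2c : 2 ≤ p.count w
  · -- word already seen at least twice: state unchanged
    have hwp : w ∈ p := List.count_pos_iff.mp (by omega)
    rw [hmc, if_pos (by simp [h2c])]
    constructor
    · simp only
      rw [pvTarget_concat_mem p w hwp, pvTarget_filter_of_two_le p w h2c, h1]
    · intro k
      rw [h2 k]
      by_cases hk : k = w
      · subst hk; rw [pvCount_concat_self]; omega
      · rw [pvCount_concat_ne p w k hk]
  · rw [hmc, if_neg (by simp [h2c])]
    by_cases hc1 : p.count w = 1
    · -- second occurrence: demote from seen_once to seen_multiple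
      have hwp : w ∈ p := List.count_pos_iff.mp (by omega)
      rw [hcont, if_pos (by simp [pvMem_target, hwp, hc1])]
      have hmw : PySem.Set.contains mult w = false := by
        rw [hmc]; simp; omega
      constructor
      · simp only [PySem.Dict.erase, h1, List.filter_map]
        rw [pvTarget_concat_mem p w hwp]
        rfl
      · intro k
        simp only [PySem.Set.add, hmw]
        simp only [Bool.false_eq_true, if_false, List.mem_append, List.mem_singleton]
        by_cases hk : k = w
        · subst hk
          rw [pvCount_concat_self, hc1]
          simp
        · rw [pvCount_concat_ne p w k hk, ← h2 k]
          simp [hk]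
    · -- first occurrence: fresh exactly-once candidate
      have hw0 : p.count w = 0 := by omega
      have hwp : w ∉ p := List.count_eq_zero.mp hw0
      have hcf : once.contains w = false := by
        rw [hcont]; simp [pvMem_target, hw0]
      rw [hcont, if_neg (by simp [pvMem_target, hw0])]
      constructor
      · simp only [PySem.Dict.insert, hcf]
        simp only [Bool.false_eq_true, if_false, h1]
        rw [pvTarget_concat_not_mem p w hwp]
        simp
      · intro k
        rw [h2 k] at *
        by_cases hk : k = w
        · subst hk
          rw [pvCount_concat_self, hw0]
          simp
        · rw [pvCount_concat_ne p w k hk]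

theorem pvInv_fold (p : List String) :
    pvInv p (p.foldl pvStepB (PySem.Dict.empty, PySem.Set.empty)) := by
  induction p using List.reverseRecOn with
  | nil =>
    constructor
    · simp [PySem.Dict.empty, pvTarget, PySem.List.dedup, PySem.Set.ofList, PySem.Set.empty]
    · intro k; simp [PySem.Set.empty, PySem.Dict.empty]
  | append_singleton p w ih =>
    rw [List.foldl_append, List.foldl_cons, List.foldl_nil]
    exact pvInv_step p w _ ih

theorem pvB_char (text : String) :
    single_appearance_alt text = pvTarget (PySem.Str.split₀ text) := by
  unfold single_appearance_alt
  have h := (pvInv_fold (PySem.Str.split₀ text)).1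
  simp only [PySem.Dict.keys]
  rw [h]
  simp [Function.comp_def]

theorem pvA_char (text : String) :
    single_appearance text = pvTarget (PySem.Str.split₀ text) := by
  unfold single_appearance pvCountMap pvFilterOnce
  have hstep : (fun (d : PySem.Dict String Int) w =>
      if (d.get? w).isSome then d.modify w 0 (fun v => v + 1) else d.insert w 1) =
      (fun d w => d.modify w 0 (fun v => v + 1)) := by
    funext d w
    by_cases h : (d.get? w).isSome
    · simp [h]
    · have hn : d.get? w = none := by
        cases hx : d.get? w with
        | none => rfl
        | some v => rw [hx] at h; simp at h
      rw [if_neg h]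
      simp [PySem.Dict.modify, PySem.Dict.getD_of_get?_eq_none d 0 hn]
  rw [hstep, ← PySem.Dict.counter_eq_foldl]
  have hite : (fun (acc : List String) k =>
      if (PySem.Dict.counter (PySem.Str.split₀ text)).getD k 0 = 1 then acc ++ [k] else acc) =
      (fun acc k => if (fun k => decide ((PySem.Dict.counter (PySem.Str.split₀ text)).getD k 0 = 1)) k = true
        then acc ++ [id k] else acc) := by
    funext acc k
    by_cases h : (PySem.Dict.counter (PySem.Str.split₀ text)).getD k 0 = 1 <;> simp [h]
  rw [hite, PySem.List.foldl_append_if, List.map_id, List.nil_append,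
    PySem.Dict.keys_counter]
  refine List.filter_congr ?_
  intro k _
  rw [PySem.Dict.getD_counter]
  by_cases h : (PySem.Str.split₀ text).count k = 1 <;> simp [h]

-- ===== VERDICT (by name: the statement is the Claim_ definition above) =====
theorem single_appearance_spec : Claim_equal_single_appearance := by
  intro text _
  unfold Spec_single_appearance
  rw [pvA_char, pvB_char]
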